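-- pv_equiv track=rewrite | github.com/2taezeat/PS | BoJ/BoJ.17406.py | transition
-- ===== SOURCE A (Python) =====
-- def transition(space, r,c,s):
--     lh_y, lh_x = r-s-1, c-s-1
--     rl_y, rl_x = r+s-1, c+s-1
--     ite_count = (rl_x - lh_x) // 2
--     standard = [ ]
--     for i in range(0, ite_count):
--         left = (lh_y+i, lh_x+i)
--         right = (rl_y-i, rl_x-i)
--         standard.append((left,right))
--
--     for ss in standard:
--         ly,lx, ry,rx = ss[0][0], ss[0][1], ss[1][0], ss[1][1]
--         l1,l2,l3,l4 = [], [], [], []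
--
--         for i in range(lx, rx):
--             l1.append(space[ly][i])
--         for i in range(ly, ry):
--             l2.append(space[i][rx])
--         for i in range(rx,lx,-1):
--             l3.append(space[ry][i])
--         for i in range(ry,ly,-1):
--             l4.append(space[i][lx])
--
--         for i in range(len(l1)):
--             space[ly][lx+1+i] = l1[i]
--         for i in range(len(l2)):
--             space[ly+1+i][rx] = l2[i]
--         for i in range(len(l1)):
--             space[ry][rx-1-i] = l3[i]
--         for i in range(len(l2)):
--             space[ry-1-i][lx] = l4[i]
--
--
--     return space
-- ===== SOURCE B (Python) =====
-- def transition(space, r, c, s):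
--     for k in range(s):
--         top, left = r - s - 1 + k, c - s - 1 + k
--         bottom, right = r + s - 1 - k, c + s - 1 - k
--         coords = [(top, x) for x in range(left, right)] \
--                + [(y, right) for y in range(top, bottom)] \
--                + [(bottom, x) for x in range(right, left, -1)] \
--                + [(y, left) for y in range(bottom, top, -1)]
--         vals = [space[y][x] for (y, x) in coords]
--         n = len(coords)
--         for i, v in enumerate(vals):
--             y, x = coords[(i + 1) % n]
--             space[y][x] = v
--     return space
-- ===== Notes on version B (the rewrite author's own statement) =====
-- stated objective: simpler
-- what changed: B replaces A's four separate edge-buffer read loops and four index-arithmetic write-back loops per ring by a single clockwise perimeter coordinate list: it reads the ring values once along the cycle and writes each value back one position ahead ((i+1) mod len), one fused pass per ring.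
import Mathlib
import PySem

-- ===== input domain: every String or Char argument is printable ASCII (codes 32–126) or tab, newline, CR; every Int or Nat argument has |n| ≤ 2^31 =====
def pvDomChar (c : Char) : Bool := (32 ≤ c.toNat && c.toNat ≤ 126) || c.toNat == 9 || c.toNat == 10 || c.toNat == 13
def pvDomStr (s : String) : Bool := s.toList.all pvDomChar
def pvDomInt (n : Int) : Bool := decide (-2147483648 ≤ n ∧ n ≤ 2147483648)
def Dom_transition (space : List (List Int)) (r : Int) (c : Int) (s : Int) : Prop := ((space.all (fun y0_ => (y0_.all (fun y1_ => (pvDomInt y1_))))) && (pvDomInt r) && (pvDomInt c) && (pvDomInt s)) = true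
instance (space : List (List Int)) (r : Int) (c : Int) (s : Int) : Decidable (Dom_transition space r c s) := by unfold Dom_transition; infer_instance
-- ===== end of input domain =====

-- B replaces A's four separate edge-buffer passes by one cyclic perimeter traversal
-- (read the ring once, write each value one step ahead along the cycle); equivalence is about
-- the RETURN value only (the Python versions also mutate `space` in place, identically).

-- shared 2-D read/write helpers (Python `space[y][x]` and `space[y][x] = v`)
def pvGet2 (g : List (List Int)) (y x : Int) : Int :=
  PySem.List.pyGetD (PySem.List.pyGetD g y []) x 0

def pvSet2 (g : List (List Int)) (y x : Int) (v : Int) : List (List Int) :=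
  PySem.List.pySetD g y (PySem.List.pySetD (PySem.List.pyGetD g y []) x v)

-- ===== PORT A =====
-- body of A's `for ss in standard` loop
def pvStepA (sp : List (List Int)) (ly lx ry rx : Int) : List (List Int) :=
  let l1 := (PySem.List.pyRange lx rx).foldl (fun acc i => acc ++ [pvGet2 sp ly i]) []
  let l2 := (PySem.List.pyRange ly ry).foldl (fun acc i => acc ++ [pvGet2 sp i rx]) []
  let l3 := (PySem.List.pyRange rx lx (-1)).foldl (fun acc i => acc ++ [pvGet2 sp ry i]) []
  let l4 := (PySem.List.pyRange ry ly (-1)).foldl (fun acc i => acc ++ [pvGet2 sp i lx]) []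
  let sp1 := (List.range l1.length).foldl (fun gg (i : Nat) => pvSet2 gg ly (lx + 1 + (i : Int)) (l1.getD i 0)) sp
  let sp2 := (List.range l2.length).foldl (fun gg (i : Nat) => pvSet2 gg (ly + 1 + (i : Int)) rx (l2.getD i 0)) sp1
  let sp3 := (List.range l1.length).foldl (fun gg (i : Nat) => pvSet2 gg ry (rx - 1 - (i : Int)) (l3.getD i 0)) sp2
  (List.range l2.length).foldl (fun gg (i : Nat) => pvSet2 gg (ry - 1 - (i : Int)) lx (l4.getD i 0)) sp3

def transition (space : List (List Int)) (r : Int) (c : Int) (s : Int) : List (List Int) :=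
  let lh_y := r - s - 1
  let lh_x := c - s - 1
  let rl_y := r + s - 1
  let rl_x := c + s - 1
  let ite_count := PySem.Int.floordiv (rl_x - lh_x) 2
  let standard := (PySem.List.pyRange 0 ite_count).foldl
      (fun acc i => acc ++ [((lh_y + i, lh_x + i), (rl_y - i, rl_x - i))]) []
  standard.foldl (fun sp ss => pvStepA sp ss.1.1 ss.1.2 ss.2.1 ss.2.2) space

-- ===== PORT B =====
-- body of B's `for k in range(s)` loop: one clockwise perimeter pass
def pvStepB (sp : List (List Int)) (top left bottom right : Int) : List (List Int) :=
  let coords := (PySem.List.pyRange left right).map (fun x => (top, x))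
             ++ (PySem.List.pyRange top bottom).map (fun y => (y, right))
             ++ (PySem.List.pyRange right left (-1)).map (fun x => (bottom, x))
             ++ (PySem.List.pyRange bottom top (-1)).map (fun y => (y, left))
  let vals := coords.map (fun yx => pvGet2 sp yx.1 yx.2)
  let n : Int := (coords.length : Int)
  (PySem.List.enumerate vals).foldl
    (fun gg iv =>
      let yx := PySem.List.pyGetD coords (PySem.Int.mod (iv.1 + 1) n) (0, 0)
      pvSet2 gg yx.1 yx.2 iv.2) sp

def transition_alt (space : List (List Int)) (r : Int) (c : Int) (s : Int) : List (List Int) :=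
  (PySem.List.pyRange 0 s).foldl
    (fun sp k => pvStepB sp (r - s - 1 + k) (c - s - 1 + k) (r + s - 1 - k) (c + s - 1 - k)) space

-- ===== PRECONDITION & SPEC =====
-- Pre_ excludes exactly the inputs on which A raises IndexError: a ring whose band of rows
-- leaves the valid (Python, wraparound included) row-index range, or a row inside the band too
-- short for the ring's extreme columns.  Wherever A returns — including negative-index
-- wraparound rings — the input is admitted and equality is proved.
def Pre_transition (space : List (List Int)) (r : Int) (c : Int) (s : Int) : Prop :=
  s ≤ 0 ∨ (-(space.length : Int) ≤ r - s - 1 ∧ r + s - 1 < (space.length : Int) ∧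
    ∀ i ∈ List.range space.length,
      ((r - s - 1 ≤ (i : Int) ∧ (i : Int) ≤ r + s - 1) ∨
        (r - s - 1 ≤ (i : Int) - space.length ∧ (i : Int) - space.length ≤ r + s - 1)) →
      (-(((space.getD i []).length : Int)) ≤ c - s - 1 ∧
        c + s - 1 < ((space.getD i []).length : Int)))
instance (space : List (List Int)) (r : Int) (c : Int) (s : Int) : Decidable (Pre_transition space r c s) := by unfold Pre_transition; infer_instance

def pvWitness_transition : List (List Int) × Int × Int × Int := ([[1,2,3],[4,5,6],[7,8,9]], 2, 2, 1)

def Spec_transition (space : List (List Int)) (r : Int) (c : Int) (s : Int) (out : List (List Int)) : Prop := out = transition_alt space r c s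
instance (space : List (List Int)) (r : Int) (c : Int) (s : Int) (out : List (List Int)) : Decidable (Spec_transition space r c s out) := by unfold Spec_transition; infer_instance

-- ===== CLAIM (what is proved, stated in full; the proofs are below) =====
def Claim_equal_transition : Prop := ∀ (space : List (List Int)) (r : Int) (c : Int) (s : Int), Dom_transition space r c s → Pre_transition space r c s → Spec_transition space r c s (transition space r c s)

-- ===== LEMMAS AND PROOFS =====

-- the ring perimeter, clockwise from the top-left corner, as four mapped segments (B's shape)
def pvC (ly lx : Int) (n : Nat) : List (Int × Int) :=
  (List.range n).map (fun (k : Nat) => (ly, lx + (k : Int)))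
  ++ ((List.range n).map (fun (k : Nat) => (ly + (k : Int), lx + (n : Int)))
  ++ ((List.range n).map (fun (k : Nat) => (ly + (n : Int), lx + (n : Int) - (k : Int)))
  ++ (List.range n).map (fun (k : Nat) => (ly + (n : Int) - (k : Int), lx))))

-- closed form of pvC by position
def pvCF (ly lx : Int) (n : Nat) (k : Nat) : Int × Int :=
  if k < n then (ly, lx + (k : Int))
  else if k < 2*n then (ly + ((k - n : Nat) : Int), lx + (n : Int))
  else if k < 3*n then (ly + (n : Int), lx + (n : Int) - ((k - 2*n : Nat) : Int))
  else (ly + (n : Int) - ((k - 3*n : Nat) : Int), lx)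

-- A's write target by position
def pvTgt (ly lx : Int) (n : Nat) (j : Nat) : Int × Int :=
  if j < n then (ly, lx + 1 + (j : Int))
  else if j < 2*n then (ly + 1 + ((j - n : Nat) : Int), lx + (n : Int))
  else if j < 3*n then (ly + (n : Int), lx + (n : Int) - 1 - ((j - 2*n : Nat) : Int))
  else (ly + (n : Int) - 1 - ((j - 3*n : Nat) : Int), lx)

def pvV (g : List (List Int)) (ly lx : Int) (n : Nat) : List Int :=
  (pvC ly lx n).map (fun yx => pvGet2 g yx.1 yx.2)

-- one element of the common write list: (target, value read at the source cell)
def pvAF (g : List (List Int)) (ly lx : Int) (n : Nat) (j : Nat) : (Int × Int) × Int :=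
  (pvTgt ly lx n j, pvGet2 g (pvCF ly lx n j).1 (pvCF ly lx n j).2)

-- A's write list: four blocks, targets shifted one step clockwise, values the four edge buffers
def pvLA (g : List (List Int)) (ly lx : Int) (n : Nat) : List ((Int × Int) × Int) :=
  (((List.range n).map (fun (i : Nat) => ((ly, lx + 1 + (i : Int)),
        ((List.range n).map (fun (x : Nat) => pvGet2 g ly (lx + (x : Int)))).getD i 0))
    ++ (List.range n).map (fun (i : Nat) => ((ly + 1 + (i : Int), lx + (n : Int)),
        ((List.range n).map (fun (x : Nat) => pvGet2 g (ly + (x : Int)) (lx + (n : Int)))).getD i 0)))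
    ++ (List.range n).map (fun (i : Nat) => ((ly + (n : Int), lx + (n : Int) - 1 - (i : Int)),
        ((List.range n).map (fun (x : Nat) => pvGet2 g (ly + (n : Int)) (lx + (n : Int) - (x : Int)))).getD i 0)))
    ++ (List.range n).map (fun (i : Nat) => ((ly + (n : Int) - 1 - (i : Int), lx),
        ((List.range n).map (fun (x : Nat) => pvGet2 g (ly + (n : Int) - (x : Int)) lx)).getD i 0))

-- B's write list: perimeter values, each sent one position ahead along the cycle
def pvLB (g : List (List Int)) (ly lx : Int) (n : Nat) : List ((Int × Int) × Int) :=
  (PySem.List.enumerate (pvV g ly lx n)).map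
    (fun iv => (PySem.List.pyGetD (pvC ly lx n) (PySem.Int.mod (iv.1 + 1) (((4*n : Nat)) : Int)) ((0:Int),(0:Int)), iv.2))

def pvApplyW (g : List (List Int)) (ws : List ((Int × Int) × Int)) : List (List Int) :=
  ws.foldl (fun gg w => pvSet2 gg w.1.1 w.1.2 w.2) g

theorem pvApplyW_map {α : Type} (g0 : List (List Int)) (l : List α) (t : α → Int × Int) (v : α → Int) :
    pvApplyW g0 (l.map (fun a => (t a, v a))) = l.foldl (fun gg a => pvSet2 gg (t a).1 (t a).2 (v a)) g0 := by
  unfold pvApplyW; rw [List.foldl_map]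

theorem pvApplyW_append (g : List (List Int)) (L1 L2 : List ((Int × Int) × Int)) :
    pvApplyW (pvApplyW g L1) L2 = pvApplyW g (L1 ++ L2) := by
  unfold pvApplyW; rw [List.foldl_append]

theorem pvC_eq_map (ly lx : Int) (n : Nat) :
    pvC ly lx n = (List.range (4*n)).map (pvCF ly lx n) := by
  have h4 : 4*n = n + (n + (n + n)) := by ring
  rw [h4, List.range_add, List.map_append, List.map_map, List.range_add, List.map_append,
    List.map_map, List.range_add, List.map_append, List.map_map]
  unfold pvC
  congr 1
  · refine List.map_congr_left ?_
    intro k hk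
    have hk' := List.mem_range.mp hk
    unfold pvCF
    rw [if_pos hk']
  congr 1
  · refine List.map_congr_left ?_
    intro k hk
    have hk' := List.mem_range.mp hk
    simp only [Function.comp_apply]
    unfold pvCF
    rw [if_neg (by omega), if_pos (by omega), Prod.mk.injEq]
    constructor <;> omega
  congr 1
  · refine List.map_congr_left ?_
    intro k hk
    have hk' := List.mem_range.mp hk
    simp only [Function.comp_apply]
    unfold pvCF
    rw [if_neg (by omega), if_neg (by omega), if_pos (by omega), Prod.mk.injEq]
    constructor <;> omega
  · refine List.map_congr_left ?_
    intro k hk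
    have hk' := List.mem_range.mp hk
    simp only [Function.comp_apply]
    unfold pvCF
    rw [if_neg (by omega), if_neg (by omega), if_neg (by omega), Prod.mk.injEq]
    constructor <;> omega

theorem pvCF_rot (ly lx : Int) (n : Nat) (hn : 1 ≤ n) (j : Nat) (hj : j < 4*n) :
    pvCF ly lx n ((j+1) % (4*n)) = pvTgt ly lx n j := by
  by_cases hlast : j + 1 = 4*n
  · rw [hlast, Nat.mod_self]
    unfold pvCF pvTgt
    split_ifs <;> rw [Prod.mk.injEq] <;> constructor <;> omega
  · rw [Nat.mod_eq_of_lt (by omega)]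
    unfold pvCF pvTgt
    split_ifs <;> rw [Prod.mk.injEq] <;> constructor <;> omega

-- B's write list, elementwise
theorem pvLB_elem (g : List (List Int)) (ly lx : Int) (n : Nat) (hn : 1 ≤ n) (j : Nat) (hj : j < 4*n) :
    (PySem.List.pyGetD (pvC ly lx n) (PySem.Int.mod ((j : Int) + 1) (((4*n : Nat)) : Int)) ((0:Int),(0:Int)),
      PySem.List.pyGetD (pvV g ly lx n) (j : Int) 0)
    = pvAF g ly lx n j := by
  have hmod : PySem.Int.mod ((j : Int) + 1) (((4*n : Nat)) : Int)
      = (((j+1) % (4*n) : Nat) : Int) := by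
    rw [PySem.Int.mod_eq_emod_of_pos (by omega)]
    push_cast
    omega
  rw [hmod]
  have h1 : PySem.List.pyGetD (pvC ly lx n) (((j+1) % (4*n) : Nat) : Int) ((0:Int),(0:Int))
      = pvCF ly lx n ((j+1) % (4*n)) := by
    rw [PySem.List.pyGetD_natCast, pvC_eq_map]
    exact PySem.List.getD_map_range _ _ _ _ (Nat.mod_lt _ (by omega))
  have h2 : PySem.List.pyGetD (pvV g ly lx n) (j : Int) 0
      = pvGet2 g (pvCF ly lx n j).1 (pvCF ly lx n j).2 := by
    rw [PySem.List.pyGetD_natCast]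
    unfold pvV
    rw [pvC_eq_map, List.map_map]
    exact PySem.List.getD_map_range _ _ _ _ hj
  rw [h1, h2, pvCF_rot ly lx n hn j hj]
  rfl

theorem pvLB_eq (g : List (List Int)) (ly lx : Int) (n : Nat) (hn : 1 ≤ n) :
    pvLB g ly lx n = (List.range (4*n)).map (pvAF g ly lx n) := by
  have hlenV : PySem.List.len (pvV g ly lx n) = (((4*n : Nat)) : Int) := by
    simp [pvV, pvC, PySem.List.len]
    ring
  unfold pvLB
  rw [PySem.List.enumerate_eq_map_pyRange (pvV g ly lx n) 0, hlenV, PySem.List.pyRange_zero_nat,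
    List.map_map, List.map_map]
  refine List.map_congr_left ?_
  intro j hj
  have hj' := List.mem_range.mp hj
  simp only [Function.comp_apply]
  exact pvLB_elem g ly lx n hn j hj'

theorem pvLA_eq (g : List (List Int)) (ly lx : Int) (n : Nat) :
    pvLA g ly lx n = (List.range (4*n)).map (pvAF g ly lx n) := by
  have h4 : 4*n = n + (n + (n + n)) := by ring
  rw [h4, List.range_add, List.map_append, List.map_map, List.range_add, List.map_append,
    List.map_map, List.range_add, List.map_append, List.map_map]
  unfold pvLA
  rw [List.append_assoc, List.append_assoc]
  congr 1
  · refine List.map_congr_left ?_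
    intro k hk
    have hk' := List.mem_range.mp hk
    simp only [pvAF, pvTgt, pvCF]
    rw [if_pos hk', if_pos hk', PySem.List.getD_map_range _ _ _ _ hk']
  congr 1
  · refine List.map_congr_left ?_
    intro k hk
    have hk' := List.mem_range.mp hk
    simp only [Function.comp_apply, pvAF, pvTgt, pvCF]
    rw [if_neg (by omega), if_pos (by omega), if_neg (by omega), if_pos (by omega),
      PySem.List.getD_map_range _ _ _ _ hk', Nat.add_sub_cancel_left]
  congr 1
  · refine List.map_congr_left ?_
    intro k hk
    have hk' := List.mem_range.mp hk
    simp only [Function.comp_apply, pvAF, pvTgt, pvCF]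
    rw [show n + (n + k) - 2*n = k from by omega, if_neg (by omega), if_neg (by omega),
      if_pos (by omega), if_neg (by omega), if_neg (by omega), if_pos (by omega),
      PySem.List.getD_map_range _ _ _ _ hk']
  · refine List.map_congr_left ?_
    intro k hk
    have hk' := List.mem_range.mp hk
    simp only [Function.comp_apply, pvAF, pvTgt, pvCF]
    rw [show n + (n + (n + k)) - 3*n = k from by omega, if_neg (by omega), if_neg (by omega),
      if_neg (by omega), if_neg (by omega), if_neg (by omega), if_neg (by omega),
      PySem.List.getD_map_range _ _ _ _ hk']

theorem pvStep_eq (g : List (List Int)) (ly lx : Int) (n : Nat) (hn : 1 ≤ n) :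
    pvStepA g ly lx (ly + (n : Int)) (lx + (n : Int)) = pvStepB g ly lx (ly + (n : Int)) (lx + (n : Int)) := by
  have hr1 := PySem.List.pyRange_one lx (lx + (n:Int))
  rw [show (lx + (n:Int) - lx).toNat = n from by omega] at hr1
  have hr2 := PySem.List.pyRange_one ly (ly + (n:Int))
  rw [show (ly + (n:Int) - ly).toNat = n from by omega] at hr2
  have hr3 := PySem.List.pyRange_neg_one (lx + (n:Int)) lx
  rw [show ((lx + (n:Int)) - lx).toNat = n from by omega] at hr3
  have hr4 := PySem.List.pyRange_neg_one (ly + (n:Int)) ly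
  rw [show ((ly + (n:Int)) - ly).toNat = n from by omega] at hr4
  simp only [pvStepA, pvStepB, hr1, hr2, hr3, hr4, PySem.List.foldl_append_singleton_eq_map,
    List.nil_append, List.map_map, List.map_append, List.length_append, List.length_map,
    List.length_range, Function.comp_def]
  have hco : List.map (fun (x : Nat) => ((ly : Int), lx + (x : Int))) (List.range n) ++
        List.map (fun (x : Nat) => (ly + (x : Int), lx + (n : Int))) (List.range n) ++
        List.map (fun (x : Nat) => (ly + (n : Int), lx + (n : Int) - (x : Int))) (List.range n) ++
        List.map (fun (x : Nat) => (ly + (n : Int) - (x : Int), lx)) (List.range n)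
      = pvC ly lx n := by
    simp only [pvC, List.append_assoc]
  have hva : List.map (fun (x : Nat) => pvGet2 g ly (lx + (x : Int))) (List.range n) ++
        List.map (fun (x : Nat) => pvGet2 g (ly + (x : Int)) (lx + (n : Int))) (List.range n) ++
        List.map (fun (x : Nat) => pvGet2 g (ly + (n : Int)) (lx + (n : Int) - (x : Int))) (List.range n) ++
        List.map (fun (x : Nat) => pvGet2 g (ly + (n : Int) - (x : Int)) lx) (List.range n)
      = pvV g ly lx n := by
    simp only [pvV, pvC, List.map_append, List.map_map, List.append_assoc, Function.comp_def]
  rw [hco, hva, show n + n + n + n = 4*n from by ring]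
  trans pvApplyW g (pvLA g ly lx n)
  · unfold pvLA
    rw [← pvApplyW_append, ← pvApplyW_append, ← pvApplyW_append,
      pvApplyW_map, pvApplyW_map, pvApplyW_map, pvApplyW_map]
  trans pvApplyW g (pvLB g ly lx n)
  · exact congrArg (pvApplyW g) (by rw [pvLA_eq, pvLB_eq g ly lx n hn])
  · unfold pvLB
    rw [pvApplyW_map]

-- ===== VERDICT (by name: the statement is the Claim_ definition above) =====
theorem transition_spec : Claim_equal_transition := by
  unfold Claim_equal_transition
  intro space r c s _hd _hp
  unfold Spec_transition transition transition_alt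
  simp only []
  have hdiv : PySem.Int.floordiv ((c + s - 1) - (c - s - 1)) 2 = s := by
    rw [PySem.Int.floordiv_eq_ediv_of_pos (by norm_num)]; omega
  rw [hdiv, PySem.List.foldl_append_singleton_eq_map, List.nil_append, List.foldl_map]
  refine PySem.List.foldl_congr_mem _ _ _ _ ?_
  intro sp k hk
  obtain ⟨hk0, hks⟩ := PySem.List.mem_pyRange_one.mp hk
  have h1 : r + s - 1 - k = (r - s - 1 + k) + (((2*(s-k)).toNat : Nat) : Int) := by omega
  have h2 : c + s - 1 - k = (c - s - 1 + k) + (((2*(s-k)).toNat : Nat) : Int) := by omega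
  rw [h1, h2]
  exact pvStep_eq sp _ _ _ (by omega)
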